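-- pv_equiv track=rewrite | github.com/StevenVerwerft/COLST | Bridge Evaluation/Bridge.py | get_hand_distribution
-- ===== SOURCE A (Python) =====
-- def get_hand_distribution(hand):
--
--     s, h, d, c = 0, 0, 0, 0
--     for card in hand:
--         if card < 13:
--             s += 1
--         elif card < 26:
--             h += 1
--         elif card < 39:
--             d += 1
--         else:
--             c += 1
--     return sorted([s, h, d, c], reverse=True)
-- ===== SOURCE B (Python) =====
-- def get_hand_distribution(hand):
--     s = sum(1 for card in hand if card < 13)
--     h = sum(1 for card in hand if 13 <= card < 26)
--     d = sum(1 for card in hand if 26 <= card < 39)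
--     c = sum(1 for card in hand if card >= 39)
--     return sorted([s, h, d, c], reverse=True)
-- ===== Notes on version B (the rewrite author's own statement) =====
-- stated objective: alternative
-- what changed: Replaces the single branching loop over four accumulators by four independent predicate-counting passes (one per suit range) whose results are then sorted.
import Mathlib
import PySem

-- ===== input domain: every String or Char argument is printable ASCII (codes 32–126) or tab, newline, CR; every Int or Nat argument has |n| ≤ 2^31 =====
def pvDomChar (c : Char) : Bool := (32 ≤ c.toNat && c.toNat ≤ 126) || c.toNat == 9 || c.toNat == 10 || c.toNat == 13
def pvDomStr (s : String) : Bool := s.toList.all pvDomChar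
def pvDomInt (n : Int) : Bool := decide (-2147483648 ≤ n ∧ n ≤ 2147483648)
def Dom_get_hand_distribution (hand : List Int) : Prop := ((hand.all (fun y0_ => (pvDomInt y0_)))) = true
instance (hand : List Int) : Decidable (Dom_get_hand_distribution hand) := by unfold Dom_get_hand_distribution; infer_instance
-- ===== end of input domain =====

-- B replaces A's single branching loop with four independent per-suit counting passes (objective: alternative).


-- ===== PORT A =====
def get_hand_distribution (hand : List Int) : List Int :=
  let st := hand.foldl (fun (acc : Int × Int × Int × Int) (card : Int) =>
    let (s, h, d, c) := acc
    if card < 13 then (s + 1, h, d, c)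
    else if card < 26 then (s, h + 1, d, c)
    else if card < 39 then (s, h, d + 1, c)
    else (s, h, d, c + 1)) (0, 0, 0, 0)
  PySem.List.sorted [st.1, st.2.1, st.2.2.1, st.2.2.2] (fun x => x) true

-- ===== PORT B =====
def pvCount1 (hand : List Int) (p : Int → Bool) : Int :=
  hand.foldl (fun acc card => if p card then acc + 1 else acc) 0

def get_hand_distribution_alt (hand : List Int) : List Int :=
  let s := pvCount1 hand (fun card => card < 13)
  let h := pvCount1 hand (fun card => 13 ≤ card && card < 26)
  let d := pvCount1 hand (fun card => 26 ≤ card && card < 39)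
  let c := pvCount1 hand (fun card => 39 ≤ card)
  PySem.List.sorted [s, h, d, c] (fun x => x) true

-- ===== PRECONDITION & SPEC =====
def Spec_get_hand_distribution (hand : List Int) (out : List Int) : Prop := out = get_hand_distribution_alt hand
instance (hand : List Int) (out : List Int) : Decidable (Spec_get_hand_distribution hand out) := by unfold Spec_get_hand_distribution; infer_instance

-- ===== CLAIM (what is proved, stated in full; the proofs are below) =====
def Claim_equal_get_hand_distribution : Prop := ∀ (hand : List Int), Dom_get_hand_distribution hand → Spec_get_hand_distribution hand (get_hand_distribution hand)

-- ===== LEMMAS AND PROOFS =====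
theorem pvCount1_shift (p : Int → Bool) (xs : List Int) (a : Int) :
    List.foldl (fun acc card => if p card then acc + 1 else acc) a xs
    = a + pvCount1 xs p := by
  induction xs generalizing a with
  | nil => simp [pvCount1]
  | cons y ys ih =>
    simp only [pvCount1, List.foldl_cons]
    rw [ih, ih (if p y then (0:Int) + 1 else 0)]
    split_ifs <;> ring

theorem pvCount1_cons (p : Int → Bool) (x : Int) (xs : List Int) :
    pvCount1 (x :: xs) p = (if p x then 1 else 0) + pvCount1 xs p := by
  simp only [pvCount1, List.foldl_cons]
  rw [pvCount1_shift]
  split_ifs <;> simp [pvCount1]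

theorem pvFold_eq_counts (hand : List Int) (s h d c : Int) :
    hand.foldl (fun (acc : Int × Int × Int × Int) (card : Int) =>
      let (s, h, d, c) := acc
      if card < 13 then (s + 1, h, d, c)
      else if card < 26 then (s, h + 1, d, c)
      else if card < 39 then (s, h, d + 1, c)
      else (s, h, d, c + 1)) (s, h, d, c)
    = (s + pvCount1 hand (fun card => card < 13),
       h + pvCount1 hand (fun card => 13 ≤ card && card < 26),
       d + pvCount1 hand (fun card => 26 ≤ card && card < 39),
       c + pvCount1 hand (fun card => 39 ≤ card)) := by
  induction hand generalizing s h d c with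
  | nil => simp [pvCount1]
  | cons x xs ih =>
    simp only [List.foldl_cons, pvCount1_cons]
    by_cases h1 : x < 13
    · simp only [h1, if_pos, ih, Prod.ext_iff]
      simp [h1] <;> omega
    · by_cases h2 : x < 26
      · simp only [ih, Prod.ext_iff]
        simp [h1, h2] <;> omega
      · by_cases h3 : x < 39
        · simp only [ih, Prod.ext_iff]
          simp [h1, h2, h3] <;> omega
        · simp only [ih, Prod.ext_iff]
          simp [h1, h2, h3] <;> omega

-- ===== VERDICT (by name: the statement is the Claim_ definition above) =====
theorem get_hand_distribution_spec : Claim_equal_get_hand_distribution := by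
  intro hand _
  unfold Spec_get_hand_distribution get_hand_distribution get_hand_distribution_alt
  rw [pvFold_eq_counts]
  simp
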